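-- pv_equiv track=rewrite | github.com/cheesecrust/logicLayout | tabularMethod.py | rowD
-- ===== SOURCE A (Python) =====
-- def rowD(tabluar):
--     newTab = []
--     for i in range(len(tabluar)):
--         for j in range(len(tabluar)):
--             if(i == j):
--                 continue
--             if(set(tabluar[i]).intersection(tabluar[j]) and len(tabluar[i]) < len(tabluar[j])):
--                 tabluar[i] = []
--                 newTab.append([])
--                 break
--         else:
--             newTab.append(tabluar[i])
--     return(newTab)
-- ===== SOURCE B (Python) =====
-- def rowD(tabluar):
--     # Return-value equivalent to A (A also empties dominated rows of its argument in place; B does not mutate).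
--     n = len(tabluar)
--     # backward pass: sufDom[i] = some LATER row shares an element and is strictly longer
--     sufDom = [False] * n
--     curMax = {}  # element -> max length of an already-seen (later) row containing it
--     for i in range(n - 1, -1, -1):
--         row = tabluar[i]
--         L = len(row)
--         sufDom[i] = any(curMax.get(e, 0) > L for e in set(row))
--         for e in set(row):
--             if curMax.get(e, 0) < L:
--                 curMax[e] = L
--     # forward pass: a row is also dominated by an EARLIER row that itself survived
--     preMax = {}  # element -> max length of a surviving earlier row containing it
--     out = []
--     for i in range(n):
--         row = tabluar[i]
--         L = len(row)
--         if sufDom[i] or any(preMax.get(e, 0) > L for e in set(row)):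
--             out.append([])
--         else:
--             out.append(row)
--             for e in set(row):
--                 if preMax.get(e, 0) < L:
--                     preMax[e] = L
--     return out
-- ===== Notes on version B (the rewrite author's own statement) =====
-- stated objective: faster
-- what changed: A's O(n^2) pairwise scan with per-pair set intersections is replaced by two linear passes keeping element -> max-row-length dictionaries (a backward pass for domination by later rows, a forward pass with survivors only for earlier rows); the input is not mutated.
import Mathlib
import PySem

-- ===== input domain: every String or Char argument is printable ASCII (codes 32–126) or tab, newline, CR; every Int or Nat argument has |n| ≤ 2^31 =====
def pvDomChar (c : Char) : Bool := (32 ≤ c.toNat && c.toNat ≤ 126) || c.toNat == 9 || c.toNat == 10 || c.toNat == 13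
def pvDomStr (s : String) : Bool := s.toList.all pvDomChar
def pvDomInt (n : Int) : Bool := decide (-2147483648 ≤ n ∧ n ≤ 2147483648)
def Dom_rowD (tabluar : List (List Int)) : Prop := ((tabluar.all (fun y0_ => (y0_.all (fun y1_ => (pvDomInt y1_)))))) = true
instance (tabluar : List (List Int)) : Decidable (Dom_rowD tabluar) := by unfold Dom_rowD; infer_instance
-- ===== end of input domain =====

-- B replaces A's quadratic pairwise set-intersection scan by two linear passes over
-- element -> max-row-length dictionaries (objective: faster). Equivalence is about the RETURN
-- value only: A empties dominated rows of its argument in place, B does not mutate.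

-- ===== PORT A =====
-- loop body of A's outer `for i in range(len(tabluar))`; the inner for/break that empties
-- tabluar[i] at the FIRST dominating j is rendered as `any` (only tabluar[i] is written, then break)
def rowDStep (n : Nat) (st : List (List Int) × List (List Int)) (i : Nat) :
    List (List Int) × List (List Int) :=
  let tab := st.1
  let newTab := st.2
  let found := (List.range n).any (fun j =>
    decide (i ≠ j) &&
    (tab.getD i []).any (fun e => (tab.getD j []).contains e) &&
    decide ((tab.getD i []).length < (tab.getD j []).length))
  if found then (tab.set i [], newTab ++ [[]]) else (tab, newTab ++ [tab.getD i []])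

def rowD (tabluar : List (List Int)) : List (List Int) :=
  ((List.range tabluar.length).foldl (rowDStep tabluar.length) (tabluar, [])).2

-- ===== PORT B =====
-- body of B's backward loop `for row in reversed(tabluar)`: record whether some already-seen
-- (i.e. later) row shares an element and is strictly longer, then fold the row into curMax
def rowDAltBStep (st : List Bool × PySem.Dict Int Nat) (row : List Int) :
    List Bool × PySem.Dict Int Nat :=
  let sufDomRev := st.1
  let curMax := st.2
  let L := row.length
  (sufDomRev ++ [(PySem.Set.ofList row).any (fun e => decide (L < curMax.getD e 0))],
   (PySem.Set.ofList row).foldl (fun d e => if d.getD e 0 < L then d.insert e L else d) curMax)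

-- sufDom = [flags of the backward pass, restored to input order]  (sufDom = sufDomRev[::-1])
def rowDAltSufDom (tabluar : List (List Int)) : List Bool :=
  (tabluar.reverse.foldl rowDAltBStep ([], PySem.Dict.empty)).1.reverse

-- body of B's forward loop `for i in range(n)`: dominated by a later row (sufDom) or by a
-- surviving earlier row (preMax); survivors are folded into preMax
def rowDAltFStep (tabluar : List (List Int)) (sufDom : List Bool)
    (st : PySem.Dict Int Nat × List (List Int)) (i : Nat) :
    PySem.Dict Int Nat × List (List Int) :=
  let preMax := st.1
  let out := st.2
  let row := tabluar.getD i []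
  let L := row.length
  if sufDom.getD i false || (PySem.Set.ofList row).any (fun e => decide (L < preMax.getD e 0)) then
    (preMax, out ++ [[]])
  else
    ((PySem.Set.ofList row).foldl (fun d e => if d.getD e 0 < L then d.insert e L else d) preMax,
     out ++ [row])

def rowD_alt (tabluar : List (List Int)) : List (List Int) :=
  ((List.range tabluar.length).foldl
    (rowDAltFStep tabluar (rowDAltSufDom tabluar)) (PySem.Dict.empty, [])).2

-- ===== PRECONDITION & SPEC =====
def Spec_rowD (tabluar : List (List Int)) (out : List (List Int)) : Prop := out = rowD_alt tabluar
instance (tabluar : List (List Int)) (out : List (List Int)) : Decidable (Spec_rowD tabluar out) := by unfold Spec_rowD; infer_instance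

-- ===== CLAIM (what is proved, stated in full; the proofs are below) =====
def Claim_equal_rowD : Prop := ∀ (tabluar : List (List Int)), Dom_rowD tabluar → Spec_rowD tabluar (rowD tabluar)

-- ===== LEMMAS AND PROOFS =====

theorem pvGetD_append_lt {α : Type} (l : List α) (x : α) (j : Nat) (d : α) (h : j < l.length) :
    (l ++ [x]).getD j d = l.getD j d := by
  simp [List.getD_eq_getElem?_getD, List.getElem?_append_left h]

theorem pvGetD_append_self {α : Type} (l : List α) (x : α) (d : α) :
    (l ++ [x]).getD l.length d = x := by
  simp [List.getD_eq_getElem?_getD]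

-- the "fold a row into a max-dictionary" update, read through `getD _ 0 > L`
theorem pvUpdMax_getD (s : List Int) (L0 : Nat) :
    ∀ (d : PySem.Dict Int Nat) (e : Int) (L : Nat),
    (s.foldl (fun d x => if d.getD x 0 < L0 then d.insert x L0 else d) d).getD e 0 > L ↔
      (d.getD e 0 > L ∨ (e ∈ s ∧ L < L0)) := by
  induction s with
  | nil => intro d e L; simp
  | cons x xs ih =>
    intro d e L
    rw [List.foldl_cons, ih]
    by_cases hxe : e = x
    · subst hxe
      by_cases hlt : d.getD e 0 < L0
      · simp only [hlt, if_true, PySem.Dict.getD_insert_self, List.mem_cons, true_or, true_and]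
        omega
      · simp only [hlt, if_false, List.mem_cons, true_or, true_and]
        omega
    · have hget : (if d.getD x 0 < L0 then d.insert x L0 else d).getD e 0 = d.getD e 0 := by
        split
        · exact PySem.Dict.getD_insert_of_ne d L0 0 hxe
        · rfl
      rw [hget]
      simp [hxe]

-- the flags the backward pass produces, with the rows already folded in as a ghost list g
def pvBFlags (g : List (List Int)) (l : List (List Int)) : List Bool :=
  match l with
  | [] => []
  | r :: rs =>
    decide (∃ e ∈ r, ∃ rr ∈ g, e ∈ rr ∧ r.length < rr.length) :: pvBFlags (g ++ [r]) rs

theorem pvBFlags_length (g l : List (List Int)) : (pvBFlags g l).length = l.length := by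
  induction l generalizing g with
  | nil => rfl
  | cons r rs ih => simp [pvBFlags, ih]

theorem pvBW (l : List (List Int)) :
    ∀ (g : List (List Int)) (sd : List Bool) (d : PySem.Dict Int Nat),
    (∀ (e : Int) (L : Nat), d.getD e 0 > L ↔ ∃ rr ∈ g, e ∈ rr ∧ L < rr.length) →
    (l.foldl rowDAltBStep (sd, d)).1 = sd ++ pvBFlags g l := by
  induction l with
  | nil => intro g sd d hd; simp [pvBFlags]
  | cons r rs ih =>
    intro g sd d hd
    rw [List.foldl_cons]
    have hflag : (rowDAltBStep (sd, d) r).1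
        = sd ++ [decide (∃ e ∈ r, ∃ rr ∈ g, e ∈ rr ∧ r.length < rr.length)] := by
      simp only [rowDAltBStep]
      refine congrArg (fun b => sd ++ [b]) ?_
      rw [Bool.eq_iff_iff]
      simp only [List.any_eq_true, PySem.Set.mem_ofList, decide_eq_true_eq]
      constructor
      · rintro ⟨e, he, hL⟩
        obtain ⟨rr, hrr, herr, hlen⟩ := (hd e r.length).1 hL
        exact ⟨e, he, rr, hrr, herr, hlen⟩
      · rintro ⟨e, he, rr, hrr, herr, hlen⟩
        exact ⟨e, he, (hd e r.length).2 ⟨rr, hrr, herr, hlen⟩⟩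
    have hdict : ∀ (e : Int) (L : Nat), (rowDAltBStep (sd, d) r).2.getD e 0 > L ↔
        ∃ rr ∈ g ++ [r], e ∈ rr ∧ L < rr.length := by
      intro e L
      simp only [rowDAltBStep]
      rw [pvUpdMax_getD, hd e L]
      simp only [PySem.Set.mem_ofList]
      constructor
      · rintro (⟨rr, hrr, herr, hlen⟩ | ⟨he, hL⟩)
        · exact ⟨rr, List.mem_append_left _ hrr, herr, hlen⟩
        · exact ⟨r, List.mem_append_right _ (List.mem_singleton.2 rfl), he, hL⟩
      · rintro ⟨rr, hrr, herr, hlen⟩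
        rcases List.mem_append.1 hrr with h1 | h1
        · exact Or.inl ⟨rr, h1, herr, hlen⟩
        · rw [List.mem_singleton.1 h1] at herr hlen
          exact Or.inr ⟨herr, hlen⟩
    have := ih (g ++ [r]) (rowDAltBStep (sd, d) r).1 (rowDAltBStep (sd, d) r).2 hdict
    rw [Prod.mk.eta] at this
    rw [this, hflag, pvBFlags, List.append_assoc]
    rfl

theorem pvBFlags_getD (l : List (List Int)) :
    ∀ (g : List (List Int)) (t : Nat), t < l.length →
    (pvBFlags g l).getD t false =
      decide (∃ e ∈ l.getD t [], ∃ rr ∈ g ++ l.take t, e ∈ rr ∧ (l.getD t []).length < rr.length) := by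
  induction l with
  | nil => intro g t ht; simp at ht
  | cons r rs ih =>
    intro g t ht
    match t with
    | 0 => simp [pvBFlags]
    | Nat.succ t =>
      have h1 : (pvBFlags g (r :: rs)).getD (t+1) false = (pvBFlags (g ++ [r]) rs).getD t false := rfl
      have h2 : (r :: rs).getD (t+1) ([] : List Int) = rs.getD t [] := rfl
      rw [h1, h2, ih (g ++ [r]) t (by simpa using ht)]
      have h3 : g ++ (r :: rs).take (t+1) = (g ++ [r]) ++ rs.take t := by
        rw [List.take_succ_cons, ← List.append_cons]
      rw [h3]

-- what sufDom says about the original rows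
theorem pvSufDom_spec (tabluar : List (List Int)) (i : Nat) (hi : i < tabluar.length) :
    ((rowDAltSufDom tabluar).getD i false = true) ↔
      ∃ j, i < j ∧ j < tabluar.length ∧ ∃ e ∈ tabluar.getD i [],
        e ∈ tabluar.getD j [] ∧ (tabluar.getD i []).length < (tabluar.getD j []).length := by
  have hbw := pvBW tabluar.reverse [] [] PySem.Dict.empty
    (by intro e L; simp [PySem.Dict.getD_empty])
  have hsd : rowDAltSufDom tabluar = (pvBFlags [] tabluar.reverse).reverse := by
    unfold rowDAltSufDom
    rw [hbw, List.nil_append]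
  have hlen : (pvBFlags [] tabluar.reverse).length = tabluar.length := by
    rw [pvBFlags_length, List.length_reverse]
  have hrev : (rowDAltSufDom tabluar).getD i false
      = (pvBFlags [] tabluar.reverse).getD (tabluar.length - 1 - i) false := by
    rw [hsd, List.getD_eq_getElem?_getD, List.getD_eq_getElem?_getD,
      List.getElem?_reverse (by rw [hlen]; omega), hlen]
  have hti : tabluar.length - 1 - i < tabluar.reverse.length := by
    simp only [List.length_reverse]; omega
  rw [hrev, pvBFlags_getD _ _ _ hti, decide_eq_true_iff]
  have hrowt : tabluar.reverse.getD (tabluar.length - 1 - i) [] = tabluar.getD i [] := by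
    rw [List.getD_eq_getElem?_getD, List.getD_eq_getElem?_getD,
      List.getElem?_reverse (by omega)]
    have : tabluar.length - 1 - (tabluar.length - 1 - i) = i := by omega
    rw [this]
  rw [hrowt]
  have hmem : ∀ rr : List Int,
      rr ∈ [] ++ tabluar.reverse.take (tabluar.length - 1 - i) ↔
        ∃ j, i < j ∧ j < tabluar.length ∧ tabluar.getD j [] = rr := by
    intro rr
    rw [List.nil_append, List.take_reverse, List.mem_reverse]
    have hdrop : tabluar.length - (tabluar.length - 1 - i) = i + 1 := by omega
    rw [hdrop]
    constructor
    · intro h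
      obtain ⟨j', hj', hget⟩ := List.mem_iff_getElem.1 h
      have hj'n : i + 1 + j' < tabluar.length := by
        rw [List.length_drop] at hj'; omega
      refine ⟨i + 1 + j', by omega, hj'n, ?_⟩
      rw [List.getD_eq_getElem _ _ hj'n, ← hget, List.getElem_drop]
    · rintro ⟨j, hij, hjn, hrr⟩
      refine List.mem_iff_getElem.2 ⟨j - (i + 1), by rw [List.length_drop]; omega, ?_⟩
      rw [List.getElem_drop, ← hrr, List.getD_eq_getElem _ _ hjn]
      congr 1
      omega
  constructor
  · rintro ⟨e, he, rr, hrr, herr, hlt⟩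
    obtain ⟨j, hij, hjn, rfl⟩ := (hmem rr).1 hrr
    exact ⟨j, hij, hjn, e, he, herr, hlt⟩
  · rintro ⟨j, hij, hjn, e, he, herr, hlt⟩
    exact ⟨e, he, tabluar.getD j [], (hmem _).2 ⟨j, hij, hjn, rfl⟩, herr, hlt⟩

-- the two forward loops kept in lock-step
def rowDInv (tabluar : List (List Int)) (k : Nat)
    (stA : List (List Int) × List (List Int)) (stB : PySem.Dict Int Nat × List (List Int)) : Prop :=
  stA.2 = stB.2 ∧ stB.2.length = k ∧ stA.1.length = tabluar.length ∧
  (∀ j, j < tabluar.length →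
    stA.1.getD j [] = if j < k then stB.2.getD j [] else tabluar.getD j []) ∧
  (∀ (e : Int) (L : Nat), stB.1.getD e 0 > L ↔
    ∃ j, j < k ∧ e ∈ stB.2.getD j [] ∧ L < (stB.2.getD j []).length)

theorem rowDStep_inv (tabluar : List (List Int)) (k : Nat) (hk : k < tabluar.length)
    (stA : List (List Int) × List (List Int)) (stB : PySem.Dict Int Nat × List (List Int))
    (h : rowDInv tabluar k stA stB) :
    rowDInv tabluar (k+1) (rowDStep tabluar.length stA k)
      (rowDAltFStep tabluar (rowDAltSufDom tabluar) stB k) := by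
  obtain ⟨tab, newTab⟩ := stA
  obtain ⟨preMax, out⟩ := stB
  obtain ⟨hout, holen, htlen, htab, hpre⟩ := h
  simp only at hout holen htlen htab hpre
  have hkt : k < tab.length := by omega
  have htabk : tab.getD k [] = tabluar.getD k [] := by
    have := htab k hk
    rw [if_neg (by omega)] at this
    exact this
  have hself : ∀ (x : List Int), (out ++ [x]).getD k ([] : List Int) = x := by
    intro x
    rw [← holen]
    exact pvGetD_append_self _ _ _
  -- the two domination tests agree
  have hfound :
      ((List.range tabluar.length).any (fun j =>
        decide (k ≠ j) &&
        (tab.getD k []).any (fun e => (tab.getD j []).contains e) &&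
        decide ((tab.getD k []).length < (tab.getD j []).length)))
      = ((rowDAltSufDom tabluar).getD k false ||
         (PySem.Set.ofList (tabluar.getD k [])).any (fun e =>
           decide ((tabluar.getD k []).length < preMax.getD e 0))) := by
    rw [Bool.eq_iff_iff]
    simp only [List.any_eq_true, List.mem_range, Bool.and_eq_true, Bool.or_eq_true,
      decide_eq_true_eq, List.contains_iff_mem, PySem.Set.mem_ofList, htabk]
    constructor
    · rintro ⟨j, hjn, ⟨hne, e, he, hej⟩, hlt⟩
      rcases Nat.lt_trichotomy j k with hj | hj | hj
      · have htj : tab.getD j [] = out.getD j [] := by rw [htab j hjn, if_pos hj]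
        rw [htj] at hej hlt
        exact Or.inr ⟨e, he, (hpre e _).2 ⟨j, hj, hej, hlt⟩⟩
      · omega
      · have htj : tab.getD j [] = tabluar.getD j [] := by rw [htab j hjn, if_neg (by omega)]
        rw [htj] at hej hlt
        exact Or.inl ((pvSufDom_spec tabluar k hk).2 ⟨j, hj, hjn, e, he, hej, hlt⟩)
    · rintro (h1 | ⟨e, he, hgt⟩)
      · obtain ⟨j, hkj, hjn, e, he, hej, hlt⟩ := (pvSufDom_spec tabluar k hk).1 h1
        have htj : tab.getD j [] = tabluar.getD j [] := by rw [htab j hjn, if_neg (by omega)]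
        exact ⟨j, hjn, ⟨by omega, e, he, htj ▸ hej⟩, htj ▸ hlt⟩
      · obtain ⟨j, hj, hej, hlt⟩ := (hpre e _).1 hgt
        have htj : tab.getD j [] = out.getD j [] := by rw [htab j (by omega), if_pos hj]
        exact ⟨j, by omega, ⟨by omega, e, he, htj ▸ hej⟩, htj ▸ hlt⟩
  by_cases hd : ((rowDAltSufDom tabluar).getD k false ||
      (PySem.Set.ofList (tabluar.getD k [])).any (fun e =>
        decide ((tabluar.getD k []).length < preMax.getD e 0))) = true
  · have hA : rowDStep tabluar.length (tab, newTab) k = (tab.set k [], newTab ++ [[]]) := by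
      simp only [rowDStep, hfound, hd, if_true]
    have hB : rowDAltFStep tabluar (rowDAltSufDom tabluar) (preMax, out) k
        = (preMax, out ++ [[]]) := by
      simp only [rowDAltFStep, hd, if_true]
    rw [hA, hB]
    refine ⟨by simpa using hout, by simpa using holen, by simpa using htlen, ?_, ?_⟩
    · intro j hjn
      show (tab.set k []).getD j [] =
        if j < k + 1 then (out ++ [[]]).getD j [] else tabluar.getD j []
      by_cases hjk : j = k
      · subst hjk
        rw [if_pos (by omega), hself]
        simp [List.getD_eq_getElem?_getD, List.getElem?_set_self hkt]
      · have hset : (tab.set k []).getD j [] = tab.getD j [] := by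
          simp [List.getD_eq_getElem?_getD, List.getElem?_set_ne (by omega : k ≠ j)]
        rw [hset, htab j hjn]
        rcases Nat.lt_trichotomy j k with hj | hj | hj
        · rw [if_pos hj, if_pos (by omega), pvGetD_append_lt _ _ _ _ (by omega)]
        · omega
        · rw [if_neg (by omega), if_neg (by omega)]
    · intro e L
      show preMax.getD e 0 > L ↔
        ∃ j, j < k + 1 ∧ e ∈ (out ++ [[]]).getD j [] ∧ L < ((out ++ [[]]).getD j []).length
      rw [hpre e L]
      constructor
      · rintro ⟨j, hj, hej, hlt⟩
        exact ⟨j, by omega, by rwa [pvGetD_append_lt _ _ _ _ (by omega)],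
          by rwa [pvGetD_append_lt _ _ _ _ (by omega)]⟩
      · rintro ⟨j, hj, hej, hlt⟩
        by_cases hjk : j = k
        · subst hjk
          rw [hself] at hej
          cases hej
        · exact ⟨j, by omega, by rwa [pvGetD_append_lt _ _ _ _ (by omega)] at hej,
            by rwa [pvGetD_append_lt _ _ _ _ (by omega)] at hlt⟩
  · rw [Bool.not_eq_true] at hd
    have hA : rowDStep tabluar.length (tab, newTab) k = (tab, newTab ++ [tab.getD k []]) := by
      simp only [rowDStep, hfound, hd, Bool.false_eq_true, if_false]
    have hB : rowDAltFStep tabluar (rowDAltSufDom tabluar) (preMax, out) k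
        = ((PySem.Set.ofList (tabluar.getD k [])).foldl
            (fun d e => if d.getD e 0 < (tabluar.getD k []).length
              then d.insert e (tabluar.getD k []).length else d) preMax,
           out ++ [tabluar.getD k []]) := by
      simp only [rowDAltFStep, hd, Bool.false_eq_true, if_false]
    rw [hA, hB]
    refine ⟨by show newTab ++ [tab.getD k []] = out ++ [tabluar.getD k []]; rw [hout, htabk],
      by simpa using holen, by simpa using htlen, ?_, ?_⟩
    · intro j hjn
      show tab.getD j [] =
        if j < k + 1 then (out ++ [tabluar.getD k []]).getD j [] else tabluar.getD j []
      by_cases hjk : j = k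
      · subst hjk
        rw [if_pos (by omega), hself]
        exact htabk
      · rw [htab j hjn]
        rcases Nat.lt_trichotomy j k with hj | hj | hj
        · rw [if_pos hj, if_pos (by omega), pvGetD_append_lt _ _ _ _ (by omega)]
        · omega
        · rw [if_neg (by omega), if_neg (by omega)]
    · intro e L
      show ((PySem.Set.ofList (tabluar.getD k [])).foldl
          (fun d e => if d.getD e 0 < (tabluar.getD k []).length
            then d.insert e (tabluar.getD k []).length else d) preMax).getD e 0 > L ↔
        ∃ j, j < k + 1 ∧ e ∈ (out ++ [tabluar.getD k []]).getD j [] ∧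
          L < ((out ++ [tabluar.getD k []]).getD j []).length
      rw [pvUpdMax_getD, hpre e L]
      simp only [PySem.Set.mem_ofList]
      constructor
      · rintro (⟨j, hj, hej, hlt⟩ | ⟨he, hL⟩)
        · exact ⟨j, by omega, by rwa [pvGetD_append_lt _ _ _ _ (by omega)],
            by rwa [pvGetD_append_lt _ _ _ _ (by omega)]⟩
        · exact ⟨k, by omega, by rwa [hself], by rwa [hself]⟩
      · rintro ⟨j, hj, hej, hlt⟩
        by_cases hjk : j = k
        · subst hjk
          rw [hself] at hej hlt
          exact Or.inr ⟨hej, hlt⟩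
        · exact Or.inl ⟨j, by omega, by rwa [pvGetD_append_lt _ _ _ _ (by omega)] at hej,
            by rwa [pvGetD_append_lt _ _ _ _ (by omega)] at hlt⟩

theorem rowDLoop (tabluar : List (List Int)) :
    ∀ (m k : Nat), k + m = tabluar.length →
    ∀ (stA : List (List Int) × List (List Int)) (stB : PySem.Dict Int Nat × List (List Int)),
    rowDInv tabluar k stA stB →
    ((List.range' k m).foldl (rowDStep tabluar.length) stA).2 =
    ((List.range' k m).foldl (rowDAltFStep tabluar (rowDAltSufDom tabluar)) stB).2 := by
  intro m
  induction m with
  | zero => intro k hk stA stB h; simpa using h.1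
  | succ m ih =>
    intro k hk stA stB h
    rw [List.range'_succ, List.foldl_cons, List.foldl_cons]
    exact ih (k+1) (by omega) _ _ (rowDStep_inv tabluar k (by omega) stA stB h)

-- ===== VERDICT (by name: the statement is the Claim_ definition above) =====
theorem rowD_spec : Claim_equal_rowD := by
  intro tabluar _
  unfold Spec_rowD rowD rowD_alt
  rw [List.range_eq_range']
  exact rowDLoop tabluar tabluar.length 0 (by omega) (tabluar, []) (PySem.Dict.empty, [])
    ⟨rfl, rfl, rfl, by intro j hj; simp, by intro e L; simp [PySem.Dict.getD_empty]⟩
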